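-- pv_equiv track=rewrite | github.com/gabiMVP/NER_WebCrawler | mainSummarizeT5.py | extractSiteMapfromRobotsTxt
-- ===== SOURCE A (Python) =====
-- def extractSiteMapfromRobotsTxt(listProp):
--     sitemap = ''
--     for line in listProp:
--         try:
--             l1 = line.split(' ')
--             if l1[0] == 'Sitemap:':
--                 sitemap = l1[1]
--         except:
--             pass
--     if sitemap == "":
--         # use sitemap list
--         pass
--     return sitemap
-- ===== SOURCE B (Python) =====
-- def extractSiteMapfromRobotsTxt(listProp):
--     # Reverse scan with early exit: the first match from the end is the last match overall.
--     for line in reversed(list(listProp)):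
--         try:
--             l1 = line.split(' ')
--             if l1[0] == 'Sitemap:':
--                 return l1[1]
--         except:
--             pass
--     return ''
-- ===== Notes on version B (the rewrite author's own statement) =====
-- stated objective: alternative
-- what changed: Replaces the full forward scan that keeps overwriting an accumulator with a reverse scan that returns early at the first matching line (the last match overall).
import Mathlib
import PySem

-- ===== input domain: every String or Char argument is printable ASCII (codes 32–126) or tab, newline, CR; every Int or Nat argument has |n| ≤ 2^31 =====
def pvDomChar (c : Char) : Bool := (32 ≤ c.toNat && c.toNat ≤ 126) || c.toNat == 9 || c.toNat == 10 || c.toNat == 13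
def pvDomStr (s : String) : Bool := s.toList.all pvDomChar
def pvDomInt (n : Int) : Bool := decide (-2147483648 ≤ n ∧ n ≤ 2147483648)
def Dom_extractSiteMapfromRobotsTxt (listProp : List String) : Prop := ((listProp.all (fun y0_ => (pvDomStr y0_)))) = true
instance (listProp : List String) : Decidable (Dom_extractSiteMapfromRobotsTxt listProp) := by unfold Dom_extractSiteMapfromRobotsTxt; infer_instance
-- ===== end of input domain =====

-- B replaces A's full forward scan with an accumulator by a reverse scan with early exit (alternative decomposition, same cost).

-- ===== PORT A =====
-- A: fold forward over the lines, overwriting `sitemap` whenever a line starts with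
-- the token 'Sitemap:' and has a second token (the IndexError on a missing second
-- token is swallowed by the bare except, i.e. the accumulator is kept).
def extractSiteMapfromRobotsTxt (listProp : List String) : String :=
  listProp.foldl
    (fun sitemap line =>
      let l1 := (PySem.Str.split? line " ").getD []
      if PySem.List.pyGet? l1 0 = some "Sitemap:" then
        match PySem.List.pyGet? l1 1 with
        | some s => s
        | none => sitemap   -- IndexError → except: pass
      else sitemap)
    ""

-- ===== PORT B =====
-- B: scan the reversed list, returning the first line that matches (early exit).
def extractAltGo : List String → String
  | [] => ""
  | line :: rest =>
    let l1 := (PySem.Str.split? line " ").getD []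
    if PySem.List.pyGet? l1 0 = some "Sitemap:" then
      match PySem.List.pyGet? l1 1 with
      | some s => s
      | none => extractAltGo rest   -- IndexError → except: pass
    else extractAltGo rest

def extractSiteMapfromRobotsTxt_alt (listProp : List String) : String :=
  extractAltGo listProp.reverse

-- ===== PRECONDITION & SPEC =====
def Spec_extractSiteMapfromRobotsTxt (listProp : List String) (out : String) : Prop := out = extractSiteMapfromRobotsTxt_alt listProp
instance (listProp : List String) (out : String) : Decidable (Spec_extractSiteMapfromRobotsTxt listProp out) := by unfold Spec_extractSiteMapfromRobotsTxt; infer_instance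

-- ===== CLAIM (what is proved, stated in full; the proofs are below) =====
def Claim_equal_extractSiteMapfromRobotsTxt : Prop := ∀ (listProp : List String), Dom_extractSiteMapfromRobotsTxt listProp → Spec_extractSiteMapfromRobotsTxt listProp (extractSiteMapfromRobotsTxt listProp)

-- ===== LEMMAS AND PROOFS =====

-- The value a single line contributes, if any.
def lineCheck (line : String) : Option String :=
  let l1 := (PySem.Str.split? line " ").getD []
  if PySem.List.pyGet? l1 0 = some "Sitemap:" then PySem.List.pyGet? l1 1 else none

lemma extractAltGo_eq (xs : List String) :
    extractAltGo xs = ((xs.findSome? lineCheck).getD "") := by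
  induction xs with
  | nil => rfl
  | cons line rest ih =>
    simp only [extractAltGo, List.findSome?, lineCheck]
    split_ifs with h
    · cases hx : PySem.List.pyGet? ((PySem.Str.split? line " ").getD []) 1 with
      | none => simpa [hx] using ih
      | some s => simp
    · simpa using ih

lemma foldA_eq (xs : List String) (acc : String) :
    xs.foldl
      (fun sitemap line =>
        let l1 := (PySem.Str.split? line " ").getD []
        if PySem.List.pyGet? l1 0 = some "Sitemap:" then
          match PySem.List.pyGet? l1 1 with
          | some s => s
          | none => sitemap
        else sitemap)
      acc = ((xs.reverse.findSome? lineCheck).getD acc) := by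
  induction xs generalizing acc with
  | nil => rfl
  | cons line rest ih =>
    simp only [List.foldl, List.reverse_cons, List.findSome?_append]
    rw [ih]
    cases hr : rest.reverse.findSome? lineCheck with
    | some v => simp
    | none =>
      simp only [Option.getD_none, Option.none_or]
      simp only [lineCheck, List.findSome?]
      split_ifs with h
      · cases hx : PySem.List.pyGet? ((PySem.Str.split? line " ").getD []) 1 with
        | none => simp
        | some s => simp
      · simp

-- ===== VERDICT (by name: the statement is the Claim_ definition above) =====
theorem extractSiteMapfromRobotsTxt_spec : Claim_equal_extractSiteMapfromRobotsTxt := by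
  intro listProp _
  show _ = _
  rw [extractSiteMapfromRobotsTxt, extractSiteMapfromRobotsTxt_alt, foldA_eq, extractAltGo_eq]
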